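-- pv_equiv track=rewrite | github.com/adjkamel/segsim | eval_unsup.py | find_largest_sequences_0_and_1
-- ===== SOURCE A (Python) =====
-- def find_largest_sequences_0_and_1(arr):
--
--     max_zeros_start = 0
--     max_zeros_end = 0
--
--     max_ones_start = 0
--     max_ones_end = 0
--
--     zero_count = 0
--     one_count = 0
--
--     for i in range(len(arr)):
--         if arr[i] == 0:
--             one_count = 0
--             zero_count += 1
--             if zero_count > max_zeros_end - max_zeros_start:
--                 max_zeros_start = i - zero_count + 1
--                 max_zeros_end = i
--         else:
--             zero_count = 0
--             one_count += 1
--             if one_count > max_ones_end - max_ones_start: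
--                 max_ones_start = i - one_count + 1
--                 max_ones_end = i
--
--     list_st_ed=[max_ones_start, max_ones_end, max_zeros_start, max_zeros_end]
--     list_st_ed_sorted=sorted(list_st_ed)
--
--     return  list_st_ed_sorted
-- ===== SOURCE B (Python) =====
-- def find_largest_sequences_0_and_1(arr):
--     # Pass 1: split arr into maximal runs (is_zero, start, length).
--     runs = []
--     cur = None
--     for i, x in enumerate(arr):
--         z = (x == 0)
--         if cur is not None and cur[0] == z:
--             cur = (z, cur[1], cur[2] + 1)
--         else:
--             if cur is not None:
--                 runs.append(cur)
--             cur = (z, i, 1)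
--     if cur is not None:
--         runs.append(cur)
--     # Pass 2: keep the last run of each kind whose length is >= the best so far.
--     zeros = (0, 0)
--     ones = (0, 0)
--     for z, s, l in runs:
--         if z:
--             if l >= zeros[1] - zeros[0] + 1:
--                 zeros = (s, s + l - 1)
--         else:
--             if l >= ones[1] - ones[0] + 1:
--                 ones = (s, s + l - 1)
--     return sorted([ones[0], ones[1], zeros[0], zeros[1]])
-- ===== Notes on version B (the rewrite author's own statement) =====
-- stated objective: alternative
-- what changed: A's single fused loop with per-element zero/one counters and in-loop best updates is replaced by a two-pass decomposition: first split the array into maximal runs (kind, start, length), then scan the run list keeping the last run of each kind whose length is >= the best so far, defaulting absent kinds to start=end=0.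
import Mathlib
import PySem

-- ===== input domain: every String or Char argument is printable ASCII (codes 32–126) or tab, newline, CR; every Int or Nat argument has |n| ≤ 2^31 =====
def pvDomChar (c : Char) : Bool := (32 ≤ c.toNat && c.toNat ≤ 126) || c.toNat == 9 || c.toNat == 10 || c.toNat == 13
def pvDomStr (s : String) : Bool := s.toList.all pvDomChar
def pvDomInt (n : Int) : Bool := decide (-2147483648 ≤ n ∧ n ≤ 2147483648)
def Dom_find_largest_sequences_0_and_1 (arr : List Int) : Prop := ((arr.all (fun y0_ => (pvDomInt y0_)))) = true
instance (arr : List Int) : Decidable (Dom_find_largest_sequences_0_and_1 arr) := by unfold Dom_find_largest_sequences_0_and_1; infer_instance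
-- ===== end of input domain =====

-- B replaces A's fused per-element counter loop by a two-pass decomposition: split the array
-- into maximal runs, then scan the run list for the last longest run of each kind (objective:
-- alternative; same cost).

-- ===== PORT A =====
-- state: (max_zeros_start, max_zeros_end, max_ones_start, max_ones_end, zero_count, one_count)
def pvAStep (st : Int × Int × Int × Int × Int × Int) (p : Int × Int) :
    Int × Int × Int × Int × Int × Int :=
  match st, p with
  | (mzs, mze, mos, moe, zc, _oc), (i, x) =>
    if x == 0 then
      let zc := zc + 1
      if zc > mze - mzs then (i - zc + 1, i, mos, moe, zc, 0)
      else (mzs, mze, mos, moe, zc, 0)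
    else
      let oc := _oc + 1
      if oc > moe - mos then (mzs, mze, i - oc + 1, i, 0, oc)
      else (mzs, mze, mos, moe, 0, oc)

def find_largest_sequences_0_and_1 (arr : List Int) : List Int :=
  let st := (PySem.List.enumerate arr).foldl pvAStep (0, 0, 0, 0, 0, 0)
  -- list_st_ed = [max_ones_start, max_ones_end, max_zeros_start, max_zeros_end]
  PySem.List.sorted [st.2.2.1, st.2.2.2.1, st.1, st.2.1] (fun x => x) false

-- ===== PORT B =====
-- pass-1 loop body: state (runs, cur), a run is (is_zero, start, length)
def pvBRun (st : List (Bool × Int × Int) × Option (Bool × Int × Int)) (p : Int × Int) :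
    List (Bool × Int × Int) × Option (Bool × Int × Int) :=
  let z := p.2 == 0
  match st.2 with
  | some c => if c.1 == z then (st.1, some (z, c.2.1, c.2.2 + 1))
              else (st.1 ++ [c], some (z, p.1, 1))
  | none => (st.1, some (z, p.1, 1))

-- trailing 'if cur is not None: runs.append(cur)'
def pvFlush (st : List (Bool × Int × Int) × Option (Bool × Int × Int)) :
    List (Bool × Int × Int) :=
  match st.2 with
  | some c => st.1 ++ [c]
  | none => st.1

def pvBest (b : Int × Int) (s l : Int) : Int × Int :=
  if l ≥ b.2 - b.1 + 1 then (s, s + l - 1) else b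

-- pass-2 loop body: state (zeros, ones)
def pvScan (st : (Int × Int) × (Int × Int)) (r : Bool × Int × Int) : (Int × Int) × (Int × Int) :=
  if r.1 then (pvBest st.1 r.2.1 r.2.2, st.2) else (st.1, pvBest st.2 r.2.1 r.2.2)

def find_largest_sequences_0_and_1_alt (arr : List Int) : List Int :=
  let runs := pvFlush ((PySem.List.enumerate arr).foldl pvBRun ([], none))
  let st := runs.foldl pvScan ((0, 0), (0, 0))
  PySem.List.sorted [st.2.1, st.2.2, st.1.1, st.1.2] (fun x => x) false

-- ===== PRECONDITION & SPEC =====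
def Spec_find_largest_sequences_0_and_1 (arr : List Int) (out : List Int) : Prop := out = find_largest_sequences_0_and_1_alt arr
instance (arr : List Int) (out : List Int) : Decidable (Spec_find_largest_sequences_0_and_1 arr out) := by unfold Spec_find_largest_sequences_0_and_1; infer_instance

-- ===== CLAIM (what is proved, stated in full; the proofs are below) =====
def Claim_equal_find_largest_sequences_0_and_1 : Prop := ∀ (arr : List Int), Dom_find_largest_sequences_0_and_1 arr → Spec_find_largest_sequences_0_and_1 arr (find_largest_sequences_0_and_1 arr)

-- ===== LEMMAS AND PROOFS =====

-- Invariant linking A's fold state to B's pass-1 state after the elements with indices < n: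
-- A's current bests are what B's pass 2 computes on the flushed run list, and A's counters
-- are the length of the pending run (whose end is at n).
def pvRel (n : Int) (a : Int × Int × Int × Int × Int × Int)
    (b : List (Bool × Int × Int) × Option (Bool × Int × Int)) : Prop :=
  ((a.1, a.2.1), (a.2.2.1, a.2.2.2.1)) = (pvFlush b).foldl pvScan ((0, 0), (0, 0)) ∧
  (match b.2 with
   | some c => c.2.1 + c.2.2 = n ∧ 1 ≤ c.2.2 ∧
       a.2.2.2.2.1 = (if c.1 then c.2.2 else 0) ∧ a.2.2.2.2.2 = (if c.1 then 0 else c.2.2)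
   | none => a.2.2.2.2.1 = 0 ∧ a.2.2.2.2.2 = 0)

lemma pvStep_rel (n x : Int) (a : Int × Int × Int × Int × Int × Int)
    (b : List (Bool × Int × Int) × Option (Bool × Int × Int)) (h : pvRel n a b) :
    pvRel (n + 1) (pvAStep a (n, x)) (pvBRun b (n, x)) := by
  obtain ⟨mzs, mze, mos, moe, zc, oc⟩ := a
  obtain ⟨runs, cur⟩ := b
  obtain ⟨h1, h2⟩ := h
  rcases hS : runs.foldl pvScan ((0, 0), (0, 0)) with ⟨⟨z1, z2⟩, o1, o2⟩
  cases cur with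
  | none =>
    obtain ⟨hz, ho⟩ := h2
    simp only [pvFlush, hS] at h1
    by_cases hx : x = 0 <;>
    · simp [pvRel, pvAStep, pvBRun, pvFlush, pvScan, pvBest, List.foldl_append,
        hS, hx] at h1 ⊢
      split_ifs at h1 ⊢ <;> simp_all <;> omega
  | some c =>
    obtain ⟨cz, cs, cl⟩ := c
    obtain ⟨hsl, hl1, hzc, hoc⟩ := h2
    simp only at hsl hl1
    cases cz <;> by_cases hx : x = 0 <;>
    · simp only [if_true, if_false, Bool.false_eq_true] at hzc hoc
      simp [pvFlush, pvScan, pvBest, List.foldl_append, hS] at h1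
      simp [pvRel, pvAStep, pvBRun, pvFlush, pvScan, pvBest, List.foldl_append,
        hS, hx, hzc, hoc] at ⊢
      split_ifs at h1 ⊢ <;> simp_all <;> omega

lemma pvFold_rel (xs : List Int) : ∀ (n : Int) a b, pvRel n a b →
    pvRel (n + xs.length) ((PySem.List.enumerate xs n).foldl pvAStep a)
      ((PySem.List.enumerate xs n).foldl pvBRun b) := by
  induction xs with
  | nil => intro n a b h; simpa using h
  | cons x xs ih =>
    intro n a b h
    rw [PySem.List.enumerate_cons]
    simp only [List.foldl_cons]
    have h' := ih (n + 1) _ _ (pvStep_rel n x a b h)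
    have hn : (n + 1) + (xs.length : Int) = n + ((x :: xs).length : Int) := by
      simp [List.length_cons]; ring
    rwa [hn] at h'

-- ===== VERDICT (by name: the statement is the Claim_ definition above) =====
theorem find_largest_sequences_0_and_1_spec : Claim_equal_find_largest_sequences_0_and_1 := by
  intro arr _
  unfold Spec_find_largest_sequences_0_and_1
  have h := pvFold_rel arr 0 (0, 0, 0, 0, 0, 0) ([], none) ⟨rfl, rfl, rfl⟩
  obtain ⟨h1, -⟩ := h
  simp only [find_largest_sequences_0_and_1, find_largest_sequences_0_and_1_alt]
  rw [← h1]
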